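-- pv_equiv track=rewrite | github.com/qiaoguanren/translator | xdl/xdl/steps/special_steps.py | apply_ongoing_locks
-- ===== SOURCE A (Python) =====
-- from typing import Union, List, Callable, Dict, Any
--
-- def apply_ongoing_locks(
--     lockmatrix: List[List[int]]
-- ) -> List[List[int]]:
--     """Fill in ongoing_locks in lockmatrix. Should be called whenever lock
--     matrix is extended.
--
--     Args:
--         lockmatrix (List[List[int]]): Lock matrix to fill in ongoing locks.
--
--     Returns:
--         List[List[int]]: Updated lock matrix.
--     """
--     for i in range(len(lockmatrix[0])):
--         ongoing_lock = False
--         for j in range(len(lockmatrix)):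
--             if lockmatrix[j][i] == 2:
--                 ongoing_lock = True
--                 continue
--             elif lockmatrix[j][i] == 3:
--                 ongoing_lock = False
--                 continue
--             if ongoing_lock:
--                 lockmatrix[j][i] = 2
--     return lockmatrix
-- ===== SOURCE B (Python) =====
-- from typing import List
--
--
-- def _fill_column(col):
--     """Interval fill: find the positions of all 2/3 markers, then overwrite the
--     half-open span after each 2-marker (up to the next marker, or the end) with 2."""
--     n = len(col)
--     out = list(col)
--     markers = [j for j in range(n) if col[j] == 2 or col[j] == 3]
--     for j, end in zip(markers, markers[1:] + [n]):
--         if col[j] == 2: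
--             for r in range(j + 1, end):
--                 out[r] = 2
--     return out
--
--
-- def apply_ongoing_locks(lockmatrix: List[List[int]]) -> List[List[int]]:
--     ncols = len(lockmatrix[0])
--     new_cols = [_fill_column([row[i] for row in lockmatrix]) for i in range(ncols)]
--     for j, row in enumerate(lockmatrix):
--         for i in range(ncols):
--             row[i] = new_cols[i][j]
--     return lockmatrix
-- ===== Notes on version B (the rewrite author's own statement) =====
-- stated objective: alternative
-- what changed: A runs a per-cell flag state machine down each column mutating in place; B first collects the index positions of all 2/3 markers in a column and then block-fills the half-open interval after each 2-marker up to the next marker (or the column end) with 2, writing the new columns back.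
import Mathlib
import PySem

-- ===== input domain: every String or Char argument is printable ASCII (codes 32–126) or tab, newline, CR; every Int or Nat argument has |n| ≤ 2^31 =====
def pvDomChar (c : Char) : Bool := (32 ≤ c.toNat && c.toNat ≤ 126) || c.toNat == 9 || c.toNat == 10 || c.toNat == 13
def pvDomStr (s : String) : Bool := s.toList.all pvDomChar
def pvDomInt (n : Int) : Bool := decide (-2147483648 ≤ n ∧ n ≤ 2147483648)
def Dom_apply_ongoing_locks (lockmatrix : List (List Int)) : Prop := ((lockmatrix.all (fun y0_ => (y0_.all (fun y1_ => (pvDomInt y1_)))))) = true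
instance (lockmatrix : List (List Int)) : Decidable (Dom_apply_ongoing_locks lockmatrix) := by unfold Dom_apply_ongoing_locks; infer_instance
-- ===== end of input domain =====

-- B replaces A's per-cell flag state machine by a marker-interval algorithm: per column it
-- collects the positions of all 2/3 markers and block-fills the span after each 2-marker up to
-- the next marker with 2 (alternative algorithm, same cost).
-- A mutates its argument in place; B performs the same mutation, and the equivalence proved here
-- is about the RETURN value.


-- ===== PORT A =====
-- body of A's inner loop over the row index j (for a fixed column i); state = (matrix, ongoing_lock)
def innerStep (i : Int) (st : List (List Int) × Bool) (j : Int) : List (List Int) × Bool :=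
  let row := st.1.getD j.toNat []
  if row.getD i.toNat 0 = 2 then (st.1, true)
  else if row.getD i.toNat 0 = 3 then (st.1, false)
  else if st.2 then (st.1.set j.toNat (row.set i.toNat 2), st.2)
  else st

def apply_ongoing_locks (lockmatrix : List (List Int)) : List (List Int) :=
  (PySem.List.pyRange 0 (((lockmatrix.headD []).length : Nat) : Int) 1).foldl
    (fun m i =>
      ((PySem.List.pyRange 0 ((m.length : Nat) : Int) 1).foldl (innerStep i) (m, false)).1)
    lockmatrix

-- ===== PORT B =====
-- the double loop of _fill_column: 'for j, end in zip(markers, markers[1:] + [n]): if col[j] == 2: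
-- for r in range(j+1, end): out[r] = 2'; range(j+1, end) over these nonnegative bounds is
-- List.range' (j+1) (end - (j+1)) exactly (empty when end ≤ j+1, as in Python)
def colFold (col : List Int) (n : Nat) (ms : List Nat) (out : List Int) : List Int :=
  (ms.zip (ms.tail ++ [n])).foldl
    (fun out p =>
      if col.getD p.1 0 = 2 then
        (List.range' (p.1 + 1) (p.2 - (p.1 + 1))).foldl (fun o r => o.set r 2) out
      else out)
    out

-- _fill_column of Source B: marker positions, then interval fill after each 2-marker
def fillColumn (col : List Int) : List Int :=
  let n := col.length
  let markers := (List.range n).filter (fun j => col.getD j 0 == 2 || col.getD j 0 == 3)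
  colFold col n markers col

def apply_ongoing_locks_alt (lockmatrix : List (List Int)) : List (List Int) :=
  let ncols := (lockmatrix.headD []).length
  let newCols := (List.range ncols).map
      (fun i => fillColumn (lockmatrix.map (fun row => row.getD i 0)))
  lockmatrix.mapIdx (fun j row =>
    row.mapIdx (fun i v => if i < ncols then (newCols.getD i []).getD j 0 else v))

-- ===== PRECONDITION & SPEC =====
-- Pre_ excludes exactly the inputs where the Python A raises IndexError: the empty matrix
-- (lockmatrix[0]) and matrices with a row shorter than row 0 (lockmatrix[j][i]); B raises there too.
def Pre_apply_ongoing_locks (lockmatrix : List (List Int)) : Prop :=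
  lockmatrix ≠ [] ∧ ∀ row ∈ lockmatrix, (lockmatrix.headD []).length ≤ row.length

instance (lockmatrix : List (List Int)) : Decidable (Pre_apply_ongoing_locks lockmatrix) := by
  unfold Pre_apply_ongoing_locks; infer_instance

def pvWitness_apply_ongoing_locks : List (List Int) := [[2, 0], [0, 3], [1, 1]]

def Spec_apply_ongoing_locks (lockmatrix : List (List Int)) (out : List (List Int)) : Prop :=
  out = apply_ongoing_locks_alt lockmatrix
instance (lockmatrix : List (List Int)) (out : List (List Int)) : Decidable (Spec_apply_ongoing_locks lockmatrix out) := by unfold Spec_apply_ongoing_locks; infer_instance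

-- ===== CLAIM (what is proved, stated in full; the proofs are below) =====
def Claim_equal_apply_ongoing_locks : Prop := ∀ (lockmatrix : List (List Int)), Dom_apply_ongoing_locks lockmatrix → Pre_apply_ongoing_locks lockmatrix → Spec_apply_ongoing_locks lockmatrix (apply_ongoing_locks lockmatrix)

-- ===== LEMMAS AND PROOFS =====

-- recursive form of A's per-column flag scan (value list) and its final flag
def fc : Bool → List Int → List Int
  | _, [] => []
  | ong, v :: vs =>
      if v = 2 then 2 :: fc true vs
      else if v = 3 then 3 :: fc false vs
      else (if ong then 2 else v) :: fc ong vs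

def fcB : Bool → List Int → Bool
  | ong, [] => ong
  | ong, v :: vs =>
      if v = 2 then fcB true vs
      else if v = 3 then fcB false vs
      else fcB ong vs

theorem fc_length (ong : Bool) (col : List Int) : (fc ong col).length = col.length := by
  induction col generalizing ong with
  | nil => rfl
  | cons v vs ih => simp only [fc]; split_ifs <;> simp [ih]

-- flag entering row t when the scan starts (flag off) at row a
def flagA (col : List Int) (a : Nat) : Nat → Bool
  | 0 => false
  | t + 1 =>
    if t + 1 ≤ a then false
    else if col.getD t 0 = 2 then true
    else if col.getD t 0 = 3 then false
    else flagA col a t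

theorem flagA_le (col : List Int) (a t : Nat) (h : t ≤ a) : flagA col a t = false := by
  cases t with
  | zero => rfl
  | succ t => simp only [flagA]; rw [if_pos h]

theorem flagA_none (col : List Int) (a : Nat) :
    ∀ t, (∀ x, a ≤ x → x < t → ¬(col.getD x 0 = 2 ∨ col.getD x 0 = 3)) →
    flagA col a t = false := by
  intro t
  induction t with
  | zero => intro _; rfl
  | succ t ih =>
      intro h
      simp only [flagA]
      by_cases ha : t + 1 ≤ a
      · rw [if_pos ha]
      · rw [if_neg ha]
        have ht := h t (by omega) (Nat.lt_succ_self t)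
        rw [if_neg (fun h2 => ht (Or.inl h2)), if_neg (fun h3 => ht (Or.inr h3))]
        exact ih (fun x hx hxt => h x hx (Nat.lt_succ_of_lt hxt))

theorem flagA_after2 (col : List Int) (a m : Nat) (h2 : col.getD m 0 = 2) (ham : a ≤ m) :
    ∀ t, m < t → (∀ x, m < x → x < t → ¬(col.getD x 0 = 2 ∨ col.getD x 0 = 3)) →
    flagA col a t = true := by
  intro t
  induction t with
  | zero => omega
  | succ t ih =>
      intro hmt h
      simp only [flagA]
      rw [if_neg (by omega)]
      rcases Nat.lt_or_ge m t with hlt | hge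
      · have ht := h t hlt (Nat.lt_succ_self t)
        rw [if_neg (fun hx => ht (Or.inl hx)), if_neg (fun hx => ht (Or.inr hx))]
        exact ih hlt (fun x hx hxt => h x hx (Nat.lt_succ_of_lt hxt))
      · have : m = t := by omega
        subst this
        rw [if_pos h2]

theorem flagA_after3 (col : List Int) (a m : Nat) (h3 : col.getD m 0 = 3) (ham : a ≤ m) :
    ∀ t, m < t → flagA col a t = flagA col (m + 1) t := by
  intro t
  induction t with
  | zero => omega
  | succ t ih =>
      intro hmt
      simp only [flagA]
      rcases Nat.lt_or_ge m t with hlt | hge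
      · rw [if_neg (by omega : ¬ t + 1 ≤ a), if_neg (by omega : ¬ t + 1 ≤ m + 1)]
        rw [ih hlt]
      · have : m = t := by omega
        subst this
        rw [if_neg (by omega : ¬ m + 1 ≤ a), if_pos (le_refl (m + 1)), h3]
        norm_num

theorem flagA_indep (col : List Int) (a a' r : Nat)
    (hr : col.getD r 0 = 2 ∨ col.getD r 0 = 3) (ha : a ≤ r) (ha' : a' ≤ r) :
    ∀ t, r < t → flagA col a t = flagA col a' t := by
  intro t
  induction t with
  | zero => omega
  | succ t ih =>
      intro hrt
      simp only [flagA]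
      rw [if_neg (by omega : ¬ t + 1 ≤ a), if_neg (by omega : ¬ t + 1 ≤ a')]
      rcases Nat.lt_or_ge r t with hlt | hge
      · by_cases hx2 : col.getD t 0 = 2
        · rw [if_pos hx2, if_pos hx2]
        · rw [if_neg hx2, if_neg hx2]
          by_cases hx3 : col.getD t 0 = 3
          · rw [if_pos hx3, if_pos hx3]
          · rw [if_neg hx3, if_neg hx3, ih hlt]
      · have : r = t := by omega
        subst this
        rcases hr with h | h <;> rw [h] <;> norm_num

theorem fcB_append_single (xs : List Int) (v : Int) : ∀ ong : Bool,
    fcB ong (xs ++ [v]) = (if v = 2 then true else if v = 3 then false else fcB ong xs) := by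
  induction xs with
  | nil =>
      intro ong
      simp only [List.nil_append, fcB]
  | cons u us ih =>
      intro ong
      simp only [List.cons_append, fcB]
      by_cases hu2 : u = 2
      · rw [if_pos hu2, if_pos hu2, ih]
      · rw [if_neg hu2, if_neg hu2]
        by_cases hu3 : u = 3
        · rw [if_pos hu3, if_pos hu3, ih]
        · rw [if_neg hu3, if_neg hu3, ih]

theorem fcB_take_flagA (col : List Int) : ∀ t, t ≤ col.length →
    fcB false (col.take t) = flagA col 0 t := by
  intro t
  induction t with
  | zero => intro _; rfl
  | succ t ih =>
      intro ht
      have htl : t < col.length := by omega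
      rw [List.take_add_one]
      have : col[t]?.toList = [col.getD t 0] := by
        rw [List.getElem?_eq_getElem htl, List.getD_eq_getElem col 0 htl]
        rfl
      rw [this, fcB_append_single]
      simp only [flagA]
      rw [if_neg (by omega : ¬ t + 1 ≤ 0), ih (by omega)]

theorem fc_getD (col : List Int) : ∀ (ong : Bool) (t : Nat), t < col.length →
    (fc ong col).getD t 0 =
      (if col.getD t 0 = 2 ∨ col.getD t 0 = 3 then col.getD t 0
       else if fcB ong (col.take t) then 2 else col.getD t 0) := by
  induction col with
  | nil => intro _ t ht; simp at ht
  | cons v vs ih =>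
      intro ong t ht
      cases t with
      | zero =>
          by_cases h2 : v = 2
          · subst h2; simp [fc]
          · by_cases h3 : v = 3
            · subst h3; simp [fc]
            · simp [fc, fcB, h2, h3]
      | succ t =>
          have ht' : t < vs.length := by simpa using ht
          simp only [List.getD_cons_succ, List.take_succ_cons]
          have hstep : ∀ (hd : Int) (ong' : Bool),
              (fc ong (v :: vs) = hd :: fc ong' vs) →
              fcB ong (v :: vs.take t) = fcB ong' (vs.take t) →
              (fc ong (v :: vs)).getD (t + 1) 0 =
                (if vs.getD t 0 = 2 ∨ vs.getD t 0 = 3 then vs.getD t 0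
                 else if fcB ong (v :: vs.take t) then 2 else vs.getD t 0) := by
            intro hd ong' hfc hfb
            rw [hfb]
            conv_lhs => rw [hfc]
            rw [List.getD_cons_succ]
            exact ih ong' t ht'
          by_cases h2 : v = 2
          · exact hstep 2 true (by simp [fc, h2]) (by simp [fcB, h2])
          · by_cases h3 : v = 3
            · exact hstep 3 false (by simp [fc, h3])
                (by simp only [fcB]; rw [if_neg h2, if_pos h3])
            · exact hstep (if ong then 2 else v) ong
                (by simp only [fc]; rw [if_neg h2, if_neg h3])
                (by simp only [fcB]; rw [if_neg h2, if_neg h3])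

-- pointwise effect of the innermost fill loop 'for r in range(s, s+c): out[r] = 2'
theorem setfold_length (c : Nat) : ∀ (s : Nat) (out : List Int),
    ((List.range' s c).foldl (fun o r => o.set r 2) out).length = out.length := by
  induction c with
  | zero => intro s out; rfl
  | succ c ih =>
      intro s out
      rw [List.range'_succ, List.foldl_cons, ih]
      simp

theorem setfold_getD (c : Nat) : ∀ (s : Nat) (out : List Int) (t : Nat), t < out.length →
    ((List.range' s c).foldl (fun o r => o.set r 2) out).getD t 0 =
      if s ≤ t ∧ t < s + c then 2 else out.getD t 0 := by
  induction c with
  | zero =>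
      intro s out t ht
      rw [if_neg (by omega)]
      rfl
  | succ c ih =>
      intro s out t ht
      rw [List.range'_succ, List.foldl_cons, ih (s+1) _ t (by simpa using ht)]
      by_cases hts : t = s
      · subst hts
        rw [if_neg (by omega), if_pos (by omega)]
        rw [List.getD_eq_getElem _ 0 (by simpa using ht), List.getElem_set_self (by simpa using ht)]
      · by_cases hin : s + 1 ≤ t ∧ t < s + 1 + c
        · rw [if_pos hin, if_pos (by omega)]
        · rw [if_neg hin, if_neg (by omega)]
          rw [List.getD_eq_getElem _ 0 (by simpa using ht), List.getD_eq_getElem _ 0 ht]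
          exact List.getElem_set_ne (by omega) _
  
theorem colFold_cons (col : List Int) (n : Nat) (m : Nat) (ms : List Nat) (out : List Int) :
    colFold col n (m :: ms) out =
      colFold col n ms
        (if col.getD m 0 = 2 then
          (List.range' (m + 1) (ms.headD n - (m + 1))).foldl (fun o r => o.set r 2) out
         else out) := by
  cases ms with
  | nil => simp [colFold]
  | cons m2 ms2 => simp [colFold]

theorem colFold_length (col : List Int) (n : Nat) (ms : List Nat) : ∀ out : List Int,
    (colFold col n ms out).length = out.length := by
  induction ms with
  | nil => intro out; rfl
  | cons m ms ih =>
      intro out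
      rw [colFold_cons, ih]
      split_ifs
      · rw [setfold_length]
      · rfl

-- the heart: the interval-fill fold computes, pointwise, 'overwrite with 2 exactly the
-- non-marker cells whose flag (entering from a) is on'
theorem colFold_getD (col : List Int) : ∀ (ms : List Nat) (a : Nat) (out : List Int),
    (∀ x ∈ ms, a ≤ x ∧ x < col.length ∧ (col.getD x 0 = 2 ∨ col.getD x 0 = 3)) →
    List.Pairwise (· < ·) ms →
    (∀ x, a ≤ x → x < col.length → (col.getD x 0 = 2 ∨ col.getD x 0 = 3) → x ∈ ms) →
    out.length = col.length →
    ∀ t, t < col.length →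
    (colFold col col.length ms out).getD t 0
      = if ¬(col.getD t 0 = 2 ∨ col.getD t 0 = 3) ∧ flagA col a t then 2 else out.getD t 0 := by
  intro ms
  induction ms with
  | nil =>
      intro a out _ _ hcomp _ t ht
      have hflag : flagA col a t = false :=
        flagA_none col a t (fun x hax hxt hP => by
          have := hcomp x hax (by omega) hP
          simp at this)
      rw [hflag]
      simp [colFold]
  | cons m ms' ih =>
      intro a out hmem hsort hcomp hlen t ht
      obtain ⟨ham, hmn, hPm⟩ := hmem m (by simp)
      have hms'gt : ∀ x ∈ ms', m < x := fun x hx => (List.pairwise_cons.mp hsort).1 x hx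
      have hnoa : ∀ x, a ≤ x → x < m → ¬(col.getD x 0 = 2 ∨ col.getD x 0 = 3) := by
        intro x hax hxm hP
        rcases List.mem_cons.mp (hcomp x hax (by omega) hP) with h | h
        · omega
        · exact absurd (hms'gt x h) (by omega)
      have hnext_gt : m < ms'.headD col.length := by
        cases ms' with
        | nil => simpa using hmn
        | cons y ys => exact hms'gt y (by simp)
      have hnext_min : ∀ x ∈ ms', ms'.headD col.length ≤ x := by
        intro x hx
        cases ms' with
        | nil => simp at hx
        | cons y ys =>
            simp only [List.headD_cons]
            rcases List.mem_cons.mp hx with rfl | hxs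
            · exact le_refl x
            · exact le_of_lt ((List.pairwise_cons.mp (List.pairwise_cons.mp hsort).2).1 x hxs)
      have hnext_le : ms'.headD col.length ≤ col.length := by
        cases ms' with
        | nil => simp
        | cons y ys => exact le_of_lt (by simpa using (hmem y (by simp)).2.1)
      have hnomid : ∀ x, m < x → x < ms'.headD col.length →
          ¬(col.getD x 0 = 2 ∨ col.getD x 0 = 3) := by
        intro x hmx hxnext hP
        have hxn : x < col.length := by omega
        rcases List.mem_cons.mp (hcomp x (by omega) hxn hP) with h | h
        · omega
        · exact absurd (hnext_min x h) (by omega)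
      have hmem' : ∀ x ∈ ms', m + 1 ≤ x ∧ x < col.length ∧ (col.getD x 0 = 2 ∨ col.getD x 0 = 3) := by
        intro x hx
        have h := hmem x (by simp [hx])
        exact ⟨by have := hms'gt x hx; omega, h.2.1, h.2.2⟩
      have hsort' : List.Pairwise (· < ·) ms' := (List.pairwise_cons.mp hsort).2
      have hcomp' : ∀ x, m + 1 ≤ x → x < col.length → (col.getD x 0 = 2 ∨ col.getD x 0 = 3) → x ∈ ms' := by
        intro x hx hxn hP
        rcases List.mem_cons.mp (hcomp x (by omega) hxn hP) with h | h
        · omega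
        · exact h
      rw [colFold_cons]
      by_cases hm2 : col.getD m 0 = 2
      · rw [if_pos hm2]
        have hlen' : ((List.range' (m + 1) (ms'.headD col.length - (m + 1))).foldl
            (fun o r => o.set r 2) out).length = col.length := by
          rw [setfold_length]; exact hlen
        rw [ih (m + 1) _ hmem' hsort' hcomp' hlen' t ht]
        rcases Nat.lt_or_ge m t with hmt | htm
        · rcases Nat.lt_or_ge t (ms'.headD col.length) with htnext | hnextt
          · -- m < t < next : inside the filled region
            have hPt : ¬(col.getD t 0 = 2 ∨ col.getD t 0 = 3) := hnomid t hmt htnext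
            have hflag : flagA col a t = true :=
              flagA_after2 col a m hm2 ham t hmt (fun x hx hxt => hnomid x hx (by omega))
            have hflag' : flagA col (m + 1) t = false :=
              flagA_none col (m + 1) t (fun x hx hxt => hnomid x (by omega) (by omega))
            have hout'_t : ((List.range' (m + 1) (ms'.headD col.length - (m + 1))).foldl
                (fun o r => o.set r 2) out).getD t 0 = 2 := by
              rw [setfold_getD _ _ _ _ (by omega)]
              rw [if_pos (by omega)]
            have hcL : ¬(¬(col.getD t 0 = 2 ∨ col.getD t 0 = 3) ∧ (false : Bool) = true) := by simp
            have hcR : (¬(col.getD t 0 = 2 ∨ col.getD t 0 = 3) ∧ (true : Bool) = true) := ⟨hPt, rfl⟩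
            rw [hflag, hflag', hout'_t, if_neg hcL, if_pos hcR]
          · -- t ≥ next : past the filled region
            have hout'_t : ((List.range' (m + 1) (ms'.headD col.length - (m + 1))).foldl
                (fun o r => o.set r 2) out).getD t 0 = out.getD t 0 := by
              rw [setfold_getD _ _ _ _ (by omega)]
              rw [if_neg (by omega)]
            have hnext_n : ms'.headD col.length < col.length := by omega
            have hnext_mem : ms'.headD col.length ∈ ms' := by
              cases ms' with
              | nil => simp at hnext_n
              | cons y ys => simp
            have hPnext : col.getD (ms'.headD col.length) 0 = 2 ∨ col.getD (ms'.headD col.length) 0 = 3 :=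
              (hmem' _ hnext_mem).2.2
            rcases Nat.eq_or_lt_of_le hnextt with heq | hlt
            · -- t = next, itself a marker
              have hPt : col.getD t 0 = 2 ∨ col.getD t 0 = 3 := heq ▸ hPnext
              have hcL : ¬(¬(col.getD t 0 = 2 ∨ col.getD t 0 = 3) ∧ flagA col (m + 1) t = true) :=
                fun hc => hc.1 hPt
              have hcR : ¬(¬(col.getD t 0 = 2 ∨ col.getD t 0 = 3) ∧ flagA col a t = true) :=
                fun hc => hc.1 hPt
              rw [if_neg hcL, if_neg hcR, hout'_t]
            · have hflag_eq : flagA col a t = flagA col (m + 1) t :=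
                flagA_indep col a (m + 1) _ hPnext (by omega) (by omega) t hlt
              rw [hflag_eq, hout'_t]
        · -- t ≤ m : untouched, flag off on both sides
          have hflag : flagA col a t = false :=
            flagA_none col a t (fun x hx hxt => hnoa x hx (by omega))
          have hflag' : flagA col (m + 1) t = false := flagA_le col (m + 1) t (by omega)
          have hout'_t : ((List.range' (m + 1) (ms'.headD col.length - (m + 1))).foldl
              (fun o r => o.set r 2) out).getD t 0 = out.getD t 0 := by
            rw [setfold_getD _ _ _ _ (by omega)]
            rw [if_neg (by omega)]
          rw [hflag, hflag', hout'_t]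
      · rw [if_neg hm2]
        have hm3 : col.getD m 0 = 3 := by tauto
        rw [ih (m + 1) out hmem' hsort' hcomp' hlen t ht]
        rcases Nat.lt_or_ge m t with hmt | htm
        · rw [flagA_after3 col a m hm3 ham t hmt]
        · have hflag : flagA col a t = false :=
            flagA_none col a t (fun x hx hxt => hnoa x hx (by omega))
          have hflag' : flagA col (m + 1) t = false := flagA_le col (m + 1) t (by omega)
          rw [hflag, hflag']

theorem fillColumn_eq_fc (col : List Int) : fillColumn col = fc false col := by
  have hfl : (fillColumn col).length = col.length := by
    unfold fillColumn
    rw [colFold_length]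
  apply List.ext_getElem
  · rw [hfl, fc_length]
  · intro t h1 h2
    have ht : t < col.length := by rwa [hfl] at h1
    have hA : (fillColumn col).getD t 0 = (fillColumn col)[t] := by
      rw [List.getD_eq_getElem _ 0 h1]
    have hB : (fc false col).getD t 0 = (fc false col)[t] := by
      rw [List.getD_eq_getElem _ 0 h2]
    rw [← hA, ← hB]
    unfold fillColumn
    rw [colFold_getD col _ 0 col ?hmem ?hsort ?hcomp rfl t ht]
    case hmem =>
      intro x hx
      simp only [List.mem_filter, List.mem_range] at hx
      refine ⟨Nat.zero_le x, hx.1, ?_⟩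
      have := hx.2
      simpa using this
    case hsort => exact List.Pairwise.filter _ (List.pairwise_lt_range)
    case hcomp =>
      intro x _ hxn hP
      simp only [List.mem_filter, List.mem_range]
      exact ⟨hxn, by simpa using hP⟩
    rw [fc_getD col false t ht, fcB_take_flagA col t (le_of_lt ht)]
    by_cases hP : col.getD t 0 = 2 ∨ col.getD t 0 = 3
    · rw [if_pos hP, if_neg (by tauto)]
    · rw [if_neg hP]
      by_cases hf : flagA col 0 t = true
      · rw [hf, if_pos ⟨hP, rfl⟩]
        simp
      · rw [if_neg (by tauto)]
        simp only [Bool.not_eq_true] at hf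
        rw [hf]
        simp

-- the effect of one pass of A's inner loop over the rows, for column n
def scanC (n : Nat) : Bool → List (List Int) → List (List Int)
  | _, [] => []
  | ong, r :: rs =>
      if r.getD n 0 = 2 then r :: scanC n true rs
      else if r.getD n 0 = 3 then r :: scanC n false rs
      else (if ong then r.set n 2 else r) :: scanC n ong rs

theorem getD_append_len (pre : List (List Int)) (r : List Int) (rs : List (List Int)) :
    (pre ++ r :: rs).getD pre.length [] = r := by
  simp [List.getD]

theorem set_append_len (pre : List (List Int)) (r r' : List Int) (rs : List (List Int)) :
    (pre ++ r :: rs).set pre.length r' = pre ++ r' :: rs := by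
  rw [List.set_append_right _ _ (le_refl _)]; simp

theorem inner_fold (n : Nat) (suf : List (List Int)) : ∀ (pre : List (List Int)) (ong : Bool),
    (PySem.List.pyRange ((pre.length : Nat) : Int) (((pre.length + suf.length : Nat)) : Int) 1).foldl
      (innerStep (n : Int)) (pre ++ suf, ong)
    = (pre ++ scanC n ong suf, fcB ong (suf.map (fun r => r.getD n 0))) := by
  induction suf with
  | nil =>
      intro pre ong
      simp [pysem, scanC, fcB]
  | cons r rs ih =>
      intro pre ong
      have key : ∀ (r' : List Int) (ong' : Bool),
          innerStep (n : Int) (pre ++ r :: rs, ong) ((pre.length : Nat) : Int) = (pre ++ r' :: rs, ong') →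
          scanC n ong (r :: rs) = r' :: scanC n ong' rs →
          fcB ong ((r :: rs).map (fun t => t.getD n 0)) = fcB ong' (rs.map (fun t => t.getD n 0)) →
          (PySem.List.pyRange ((pre.length : Nat) : Int) (((pre.length + (r :: rs).length : Nat)) : Int) 1).foldl
              (innerStep (n : Int)) (pre ++ r :: rs, ong)
            = (pre ++ scanC n ong (r :: rs), fcB ong ((r :: rs).map (fun t => t.getD n 0))) := by
        intro r' ong' hstep hscan hfcb
        have hlt : ((pre.length : Nat) : Int) < (((pre.length + (r :: rs).length : Nat)) : Int) := by
          simp only [List.length_cons]; push_cast; omega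
        rw [PySem.List.pyRange_one_cons hlt, List.foldl_cons, hstep, hscan, hfcb]
        rw [show pre.length + (r :: rs).length = (pre ++ [r']).length + rs.length from by
          simp; omega]
        rw [show ((pre.length : Nat) : Int) + 1 = (((pre ++ [r']).length : Nat) : Int) from by
          simp]
        rw [show pre ++ r' :: rs = (pre ++ [r']) ++ rs from by simp]
        rw [ih (pre ++ [r']) ong']
        simp
      by_cases h2 : r.getD n 0 = 2
      · refine key r true ?_ ?_ ?_
        · simp only [innerStep, Int.toNat_natCast, getD_append_len]
          rw [if_pos h2]
        · simp only [scanC]; rw [if_pos h2]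
        · simp only [List.map_cons, fcB]; rw [if_pos h2]
      · by_cases h3 : r.getD n 0 = 3
        · refine key r false ?_ ?_ ?_
          · simp only [innerStep, Int.toNat_natCast, getD_append_len]
            rw [if_neg h2, if_pos h3]
          · simp only [scanC]; rw [if_neg h2, if_pos h3]
          · simp only [List.map_cons, fcB]; rw [if_neg h2, if_pos h3]
        · cases ong with
          | true =>
              refine key (r.set n 2) true ?_ ?_ ?_
              · simp only [innerStep, Int.toNat_natCast, getD_append_len, set_append_len]
                rw [if_neg h2, if_neg h3]; rfl
              · simp only [scanC]; rw [if_neg h2, if_neg h3]; simp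
              · simp only [List.map_cons, fcB]; rw [if_neg h2, if_neg h3]
          | false =>
              refine key r false ?_ ?_ ?_
              · simp only [innerStep, Int.toNat_natCast, getD_append_len]
                rw [if_neg h2, if_neg h3]; rfl
              · simp only [scanC]; rw [if_neg h2, if_neg h3]; rfl
              · simp only [List.map_cons, fcB]; rw [if_neg h2, if_neg h3]

theorem pyRange_cast (n : Nat) :
    PySem.List.pyRange 0 ((n : Nat) : Int) 1 = List.map (fun (k : Nat) => (k : Int)) (List.range n) := by
  rw [PySem.List.pyRange_zero_natCast]

-- A as a fold of scanC over the columns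
theorem A_as_foldcols (m : List (List Int)) :
    apply_ongoing_locks m
    = (List.range (m.headD []).length).foldl (fun mm k => scanC k false mm) m := by
  unfold apply_ongoing_locks
  rw [pyRange_cast, List.foldl_map]
  have hinner : ∀ (mm : List (List Int)) (k : Nat),
      ((PySem.List.pyRange 0 ((mm.length : Nat) : Int) 1).foldl (innerStep (k : Int)) (mm, false)).1
        = scanC k false mm := by
    intro mm k
    have h := inner_fold k mm [] false
    simp only [List.length_nil, Nat.cast_zero, Nat.zero_add, List.nil_append] at h
    rw [h]
  rw [show (fun (mm : List (List Int)) (k : Nat) =>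
      ((PySem.List.pyRange 0 ((mm.length : Nat) : Int) 1).foldl (innerStep (k : Int)) (mm, false)).1)
      = (fun mm k => scanC k false mm) from funext fun mm => funext fun k => hinner mm k]

-- the target matrix after the first k columns have been filled in
def Tk (m : List (List Int)) (k : Nat) : List (List Int) :=
  m.mapIdx (fun j row =>
    row.mapIdx (fun i v =>
      if i < k then (fc false (m.map (fun r => r.getD i 0))).getD j 0 else v))

theorem set_getD_self (r : List Int) (n : Nat) (h : n < r.length) :
    r.set n (r.getD n 0) = r := by
  rw [List.getD_eq_getElem r 0 h]
  exact List.set_getElem_self h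

theorem scanC_zip (n : Nat) (rows : List (List Int)) : ∀ ong : Bool,
    (∀ r ∈ rows, n < r.length) →
    scanC n ong rows
      = List.zipWith (fun r v => r.set n v) rows (fc ong (rows.map (fun r => r.getD n 0))) := by
  induction rows with
  | nil => intro ong _; rfl
  | cons r rs ih =>
      intro ong hlen
      have hr : n < r.length := hlen r (by simp)
      have hrs : ∀ t ∈ rs, n < t.length := fun t ht => hlen t (by simp [ht])
      simp only [scanC, List.map_cons, fc]
      by_cases h2 : r.getD n 0 = 2
      · rw [if_pos h2, if_pos h2, List.zipWith_cons_cons, ih true hrs]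
        rw [show r.set n 2 = r from by rw [← h2]; exact set_getD_self r n hr]
      · by_cases h3 : r.getD n 0 = 3
        · rw [if_neg h2, if_pos h3, if_neg h2, if_pos h3, List.zipWith_cons_cons, ih false hrs]
          rw [show r.set n 3 = r from by rw [← h3]; exact set_getD_self r n hr]
        · cases ong with
          | true =>
              rw [if_neg h2, if_neg h3, if_neg h2, if_neg h3, List.zipWith_cons_cons, ih true hrs]
              simp
          | false =>
              rw [if_neg h2, if_neg h3, if_neg h2, if_neg h3, List.zipWith_cons_cons, ih false hrs]
              simp only [Bool.false_eq_true, if_false]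
              rw [set_getD_self r n hr]

theorem mapIdx_id_eq (l : List Int) : l.mapIdx (fun _ v => v) = l := by
  apply List.ext_getElem <;> simp

theorem Tk_zero (m : List (List Int)) : Tk m 0 = m := by
  unfold Tk
  simp only [Nat.not_lt_zero, if_false]
  apply List.ext_getElem <;> simp [mapIdx_id_eq]

theorem getD_mapIdx (l : List Int) (f : Nat → Int → Int) (i : Nat) (d : Int) :
    (l.mapIdx f).getD i d = if h : i < l.length then f i l[i] else d := by
  by_cases h : i < l.length
  · rw [dif_pos h, List.getD_eq_getElem _ _ (by simpa using h), List.getElem_mapIdx]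
  · rw [dif_neg h, List.getD_eq_default _ _ (by simpa using Nat.le_of_not_lt h)]

theorem Tk_col (m : List (List Int)) (k : Nat) :
    (Tk m k).map (fun r => r.getD k 0) = m.map (fun r => r.getD k 0) := by
  apply List.ext_getElem
  · simp [Tk]
  · intro j h1 h2
    have hj : j < m.length := by simpa using h2
    rw [List.getElem_map, List.getElem_map]
    simp only [Tk, List.getElem_mapIdx]
    by_cases h : k < (m[j]).length
    · rw [getD_mapIdx, dif_pos h, if_neg (lt_irrefl k), List.getD_eq_getElem _ _ h]
    · rw [getD_mapIdx, dif_neg h, List.getD_eq_default _ _ (Nat.le_of_not_lt h)]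

theorem Tk_length (m : List (List Int)) (k : Nat) : (Tk m k).length = m.length := by
  simp [Tk]

theorem Tk_step (m : List (List Int)) (k : Nat)
    (hlen : ∀ row ∈ m, k < row.length) :
    scanC k false (Tk m k) = Tk m (k + 1) := by
  have hlen' : ∀ r ∈ Tk m k, k < r.length := by
    intro r hr
    obtain ⟨j, hj, rfl⟩ := List.mem_iff_getElem.mp hr
    have hj' : j < m.length := by simpa [Tk] using hj
    simp only [Tk, List.getElem_mapIdx, List.length_mapIdx]
    exact hlen _ (List.getElem_mem hj')
  rw [scanC_zip k (Tk m k) false hlen', Tk_col]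
  have hfclen : (fc false (m.map (fun r => r.getD k 0))).length = m.length := by
    rw [fc_length, List.length_map]
  apply List.ext_getElem
  · rw [List.length_zipWith, Tk_length, Tk_length, hfclen, min_self]
  · intro j h1 h2
    have hjm : j < m.length := by rw [Tk_length] at h2; exact h2
    rw [List.getElem_zipWith]
    simp only [Tk, List.getElem_mapIdx]
    apply List.ext_getElem
    · simp
    · intro i hi1 hi2
      have hik : k < (m[j]).length := hlen _ (List.getElem_mem hjm)
      simp only [List.getElem_set, List.getElem_mapIdx]
      by_cases hik' : k = i
      · subst hik'
        rw [if_pos rfl, if_pos (Nat.lt_succ_self k),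
          List.getD_eq_getElem _ _ (show j < _ from by rw [hfclen]; exact hjm)]
      · rw [if_neg hik']
        by_cases hlt : i < k
        · rw [if_pos hlt, if_pos (Nat.lt_succ_of_lt hlt)]
        · rw [if_neg hlt, if_neg (by omega)]

theorem B_eq_Tk (m : List (List Int)) :
    apply_ongoing_locks_alt m = Tk m (m.headD []).length := by
  unfold apply_ongoing_locks_alt Tk
  apply List.ext_getElem
  · simp
  · intro j h1 h2
    have hjm : j < m.length := by simpa using h2
    simp only [List.getElem_mapIdx]
    apply List.ext_getElem
    · simp
    · intro i hi1 hi2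
      simp only [List.getElem_mapIdx]
      by_cases h : i < (m.headD []).length
      · rw [if_pos h, if_pos h,
          PySem.List.getD_map_range (fun i => fillColumn (m.map (fun row => row.getD i 0))) _ i _ h,
          fillColumn_eq_fc]
      · rw [if_neg h, if_neg h]

theorem fold_scanC (m : List (List Int)) (ncols : Nat)
    (hlen : ∀ row ∈ m, ncols ≤ row.length) :
    ∀ k, k ≤ ncols → (List.range k).foldl (fun mm i => scanC i false mm) m = Tk m k := by
  intro k
  induction k with
  | zero => intro _; simpa using (Tk_zero m).symm
  | succ k ih =>
      intro hk
      rw [List.range_succ, List.foldl_append, ih (Nat.le_of_succ_le hk)]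
      simp only [List.foldl_cons, List.foldl_nil]
      exact Tk_step m k (fun row hr => Nat.lt_of_lt_of_le (Nat.lt_of_lt_of_le (Nat.lt_succ_self k) hk) (hlen row hr))

-- ===== VERDICT (by name: the statement is the Claim_ definition above) =====
theorem apply_ongoing_locks_spec : Claim_equal_apply_ongoing_locks := by
  intro m _ hpre
  unfold Spec_apply_ongoing_locks
  rw [A_as_foldcols, B_eq_Tk]
  exact fold_scanC m (m.headD []).length hpre.2 _ (le_refl _)
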